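-- pv_equiv track=rewrite | github.com/ML4SCI/QMLHEP | Quantum_GAN_for_HEP_Chi_Lung_Cheng/quple/components/interaction_graphs.py | alternate_cyclic
-- ===== SOURCE A (Python) =====
-- from typing import List, Tuple
--
-- def alternate_cyclic(n:int, m:int=2) -> List[Tuple[int]]:
--     """The alternate linear interaction
--
--     In the alternate, all neiboring qubits as well as the first and last qubit
--     are connected in an alternating manner
--
--     Examples:
--     # Alternate cyclic graph for 5 qubit system with 2 qubit interaction
--     >> alternate_cyclic(n=5, m=2)
--     [(0, 1), (2, 3), (1, 2), (3, 4), (4, 0)]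
--     # Building a circuit of 5 qubits with a layer of CNOT gates using
--     # the alternate linear interaction graph
--     >> cq = ParameterisedCircuit(n_qubit=4)
--     >> cq.add_entanglement_layer(['CNOT'], entangle_strategy='alternate_linear')
--     >> cq
--     (0, 0): ───@───────X───
--                │       │
--     (0, 1): ───X───@───┼───
--                    │   │
--     (0, 2): ───@───X───┼───
--                │       │
--     (0, 3): ───X───@───┼───
--                    │   │
--     (0, 4): ───────X───@───
--
--     Args:
--         n: int
--         Number of qubits in the system
--         m: int
--         Number of qubits involved in the multi-qubit interaction
--
--     Returns:
--         A list of tuples of qubit indices. Each tuple specifies the indices of the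
--         qubits that are involved in the multi-qubit interaction.
--     """
--     if m > 2:
--         raise ValueError('The "alternate linear" connectivity graphs requires <= 2 '
--                          'qubits in the interaction unit'
--                         ' but {} is given'.format(m))
--     if n < 2:
--         raise ValueError('The "alternate linear" connectivity graphs requires at least '
--                          '2 qubits in the circuit')
--     if m == 2:
--         return [(i, i+1) for i in range(0, n - 1, m)] + [(i+1, i+2) for i in range(0, n - 2, m)] + [tuple(range(n - m + 1, n)) + (0,)]
--     else:
--         return [(i,) for i in range(n)]
-- ===== SOURCE B (Python) =====
-- from typing import List, Tuple
--
-- def alternate_cyclic(n: int, m: int = 2) -> List[Tuple[int]]: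
--     if m > 2:
--         raise ValueError('The "alternate linear" connectivity graphs requires <= 2 '
--                          'qubits in the interaction unit'
--                          ' but {} is given'.format(m))
--     if n < 2:
--         raise ValueError('The "alternate linear" connectivity graphs requires at least '
--                          '2 qubits in the circuit')
--     if m != 2:
--         return [(i,) for i in range(n)]
--     evens = []
--     odds = []
--     for i in range(n - 1):
--         if i % 2 == 0:
--             evens.append((i, i + 1))
--         else:
--             odds.append((i, i + 1))
--     return evens + odds + [(n - 1, 0)]
-- ===== Notes on version B (the rewrite author's own statement) =====
-- stated objective: alternative
-- what changed: Replaces the two strided range(.,.,2) comprehensions by a single pass over all consecutive edges that partitions them into even-start and odd-start groups by parity of the index.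
import Mathlib
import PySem

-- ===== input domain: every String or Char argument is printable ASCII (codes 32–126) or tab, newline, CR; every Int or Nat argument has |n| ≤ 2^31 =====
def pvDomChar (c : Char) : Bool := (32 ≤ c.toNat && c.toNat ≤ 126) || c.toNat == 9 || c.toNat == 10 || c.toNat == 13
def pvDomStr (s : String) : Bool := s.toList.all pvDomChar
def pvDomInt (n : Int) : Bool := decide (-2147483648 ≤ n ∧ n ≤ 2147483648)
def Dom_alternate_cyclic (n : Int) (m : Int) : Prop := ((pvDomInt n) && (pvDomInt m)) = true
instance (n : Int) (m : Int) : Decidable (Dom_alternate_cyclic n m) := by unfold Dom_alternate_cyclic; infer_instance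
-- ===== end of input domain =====

-- B replaces A's two strided range(.,.,2) comprehensions by one pass over the
-- consecutive edges, partitioned by parity of the start index (objective: alternative).

-- ===== PORT A =====
def alternate_cyclic (n : Int) (m : Int) : List (List Int) :=
  if m > 2 then []        -- Python: raise ValueError (excluded by Pre_)
  else if n < 2 then []   -- Python: raise ValueError (excluded by Pre_)
  else if m = 2 then
    ((PySem.List.pyRange 0 (n - 1) m).map (fun i => [i, i + 1])) ++
    ((PySem.List.pyRange 0 (n - 2) m).map (fun i => [i + 1, i + 2])) ++
    [PySem.List.pyRange (n - m + 1) n 1 ++ [0]]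
  else
    (PySem.List.pyRange 0 n 1).map (fun i => [i])

-- ===== PORT B =====
-- loop body: append edge (i, i+1) to evens if i % 2 == 0 else to odds
def acStep (p : List (List Int) × List (List Int)) (i : Int) :
    List (List Int) × List (List Int) :=
  if PySem.Int.mod i 2 = 0 then (p.1 ++ [[i, i + 1]], p.2)
  else (p.1, p.2 ++ [[i, i + 1]])

def alternate_cyclic_alt (n : Int) (m : Int) : List (List Int) :=
  if m > 2 then []        -- Python: raise ValueError (excluded by Pre_)
  else if n < 2 then []   -- Python: raise ValueError (excluded by Pre_)
  else if m ≠ 2 then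
    (PySem.List.pyRange 0 n 1).map (fun i => [i])
  else
    let p := (PySem.List.pyRange 0 (n - 1) 1).foldl acStep ([], [])
    p.1 ++ p.2 ++ [[n - 1, 0]]

-- ===== PRECONDITION & SPEC =====
-- Pre_ excludes exactly the inputs on which A raises ValueError (m > 2 or n < 2).
def Pre_alternate_cyclic (n : Int) (m : Int) : Prop := m ≤ 2 ∧ 2 ≤ n
instance (n : Int) (m : Int) : Decidable (Pre_alternate_cyclic n m) := by
  unfold Pre_alternate_cyclic; infer_instance

def pvWitness_alternate_cyclic : Int × Int := (5, 2)

def Spec_alternate_cyclic (n : Int) (m : Int) (out : List (List Int)) : Prop := out = alternate_cyclic_alt n m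
instance (n : Int) (m : Int) (out : List (List Int)) : Decidable (Spec_alternate_cyclic n m out) := by unfold Spec_alternate_cyclic; infer_instance

-- ===== CLAIM (what is proved, stated in full; the proofs are below) =====
def Claim_equal_alternate_cyclic : Prop := ∀ (n : Int) (m : Int), Dom_alternate_cyclic n m → Pre_alternate_cyclic n m → Spec_alternate_cyclic n m (alternate_cyclic n m)

-- ===== LEMMAS AND PROOFS =====

-- closed forms for the even-start and odd-start edge groups
def evF (k : Nat) : List Int := [2 * (k : Int), 2 * (k : Int) + 1]
def odF (k : Nat) : List Int := [2 * (k : Int) + 1, 2 * (k : Int) + 2]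

-- A's first comprehension
theorem a_ev (N : Nat) :
    (PySem.List.pyRange 0 (N : Int) 2).map (fun i => [i, i + 1]) =
      (List.range ((N + 1) / 2)).map evF := by
  rw [PySem.List.pyRange_of_pos 0 (N : Int) (by norm_num)]
  have hc : (if (0 : Int) < (N : Int) then (((N : Int) - 0 + 2 - 1) / 2).toNat else 0) =
      (N + 1) / 2 := by
    split_ifs with h <;> omega
  rw [hc, List.map_map]
  apply List.map_congr_left
  intro k _
  simp [evF]

-- A's second comprehension
theorem a_od (N : Nat) :
    (PySem.List.pyRange 0 ((N : Int) - 1) 2).map (fun i => [i + 1, i + 2]) =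
      (List.range (N / 2)).map odF := by
  rw [PySem.List.pyRange_of_pos 0 ((N : Int) - 1) (by norm_num)]
  have hc : (if (0 : Int) < (N : Int) - 1 then (((N : Int) - 1 - 0 + 2 - 1) / 2).toNat else 0) =
      N / 2 := by
    split_ifs with h <;> omega
  rw [hc, List.map_map]
  apply List.map_congr_left
  intro k _
  simp [odF]

-- B's single pass partitions the edges into exactly those two groups
theorem b_fold (N : Nat) (e o : List (List Int)) :
    (PySem.List.pyRange 0 (N : Int) 1).foldl acStep (e, o) =
      (e ++ (List.range ((N + 1) / 2)).map evF, o ++ (List.range (N / 2)).map odF) := by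
  induction N generalizing e o with
  | zero => simp
  | succ N ih =>
    have hstep : (PySem.List.pyRange 0 ((N : Int) + 1) 1) =
        PySem.List.pyRange 0 (N : Int) 1 ++ [(N : Int)] :=
      PySem.List.pyRange_one_succ_right (by omega)
    have hcast : ((N + 1 : Nat) : Int) = (N : Int) + 1 := by push_cast; ring
    rw [hcast, hstep, List.foldl_append, ih]
    simp only [List.foldl_cons, List.foldl_nil, acStep]
    have hmod : PySem.Int.mod (N : Int) 2 = (N : Int) % 2 :=
      PySem.Int.mod_eq_emod_of_pos (by norm_num)
    by_cases hpar : N % 2 = 0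
    · have h2 : PySem.Int.mod (N : Int) 2 = 0 := by rw [hmod]; omega
      rw [if_pos h2]
      have he : (N + 1 + 1) / 2 = (N + 1) / 2 + 1 := by omega
      have ho : (N + 1) / 2 = N / 2 := by omega
      simp only [he, ho, List.range_succ, List.map_append, List.map_cons, List.map_nil]
      refine Prod.ext ?_ rfl
      simp [evF]
      omega
    · have h2 : ¬ PySem.Int.mod (N : Int) 2 = 0 := by rw [hmod]; omega
      rw [if_neg h2]
      have he : (N + 1 + 1) / 2 = (N + 1) / 2 := by omega
      have ho : (N + 1) / 2 = N / 2 + 1 := by omega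
      simp only [he, ho, List.range_succ, List.map_append, List.map_cons, List.map_nil]
      refine Prod.ext rfl ?_
      simp [odF]
      omega

-- ===== VERDICT (by name: the statement is the Claim_ definition above) =====
theorem alternate_cyclic_spec : Claim_equal_alternate_cyclic := by
  intro n m _ hpre
  obtain ⟨hm, hn⟩ := hpre
  unfold Spec_alternate_cyclic alternate_cyclic alternate_cyclic_alt
  by_cases hm2 : m = 2
  · subst hm2
    rw [if_neg (show ¬ (2:Int) > 2 by omega), if_neg (show ¬ n < 2 by omega),
        if_pos rfl, if_neg (show ¬ (2:Int) > 2 by omega), if_neg (show ¬ n < 2 by omega),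
        if_neg (show ¬ (2:Int) ≠ 2 by simp)]
    set N : Nat := (n - 1).toNat with hN
    have h1 : n - 1 = (N : Int) := by omega
    have h2 : n - 2 = (N : Int) - 1 := by omega
    have h4 : n = (N : Int) + 1 := by omega
    rw [h1, h2, show ((N:Int) - 1 + 1) = (N:Int) from by ring, a_ev, a_od, b_fold]
    conv_lhs => rw [h4, PySem.List.pyRange_one_singleton]
    simp
  · rw [if_neg (show ¬ m > 2 by omega), if_neg (show ¬ n < 2 by omega),
        if_neg hm2, if_neg (show ¬ m > 2 by omega), if_neg (show ¬ n < 2 by omega),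
        if_pos hm2]
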